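-- pv_equiv track=rewrite | github.com/Batch00/Introduction-to-AI | A Star Search Algorithm/funny_puzzle.py | get_succ
-- ===== SOURCE A (Python) =====
-- def get_succ(state):
--     """
--     TODO: implement this function.
--
--     INPUT:
--         A state (list of length 9)
--
--     RETURNS:
--         A list of all the valid successors in the puzzle (don't forget to sort the result as done below).
--     """
--     succ_states = []
--     n = int(len(state)**0.5)
--     empty_indices = [i for i, tile in enumerate(state) if tile == 0]
--     for empty_index in empty_indices:
--         i = empty_index // n
--         j = empty_index % n
--
--         if i > 0 and state[(i-1)*n+j] != 0: # move a tile down into empty space: there is an empty space not on top row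
--             successor = state[:]
--             successor[empty_index] = successor[(i-1)*n+j] #empty_index-3: the space above
--             successor[(i-1)*n+j] = 0
--             succ_states.append(successor)
--         if i < n-1 and state[(i+1)*n+j] != 0: # move a tile up into empty space: there is an empty space not on bottom row
--             successor = state[:]
--             successor[empty_index] = successor[(i+1)*n+j] #empty_index+3: the space above
--             successor[(i+1)*n+j] = 0
--             succ_states.append(successor)
--         if j > 0 and state[i*n+(j-1)] != 0: # move a tile right into empty space: there is an empty space not on left
--             successor = state[:]
--             successor[empty_index] = successor[i*n+(j-1)] # make value of right "0" tile the value of the left one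
--             successor[i*n+(j-1)] = 0
--             succ_states.append(successor)
--         if j < n-1 and state[i*n+(j+1)] != 0: # move a tile left into empty space: there is an empty space not on right
--                 successor = state[:]
--                 successor[empty_index] = successor[i*n+(j+1)] # make value of left "0" tile the value of the right one
--                 successor[i*n+(j+1)] = 0
--                 succ_states.append(successor)
--     return sorted(succ_states)
-- ===== SOURCE B (Python) =====
-- def _swapped(state, a, b):
--     return [state[b] if m == a else state[a] if m == b else x
--             for m, x in enumerate(state)]
--
--
-- def _insert_sorted(out, s):
--     i = 0
--     while i < len(out) and not s < out[i]:
--         i += 1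
--     out.insert(i, s)
--
--
-- def get_succ(state):
--     n = int(len(state) ** 0.5)
--     out = []
--     for k in range(len(state) - 1):
--         if k % n != n - 1 and (state[k] == 0) != (state[k + 1] == 0):
--             _insert_sorted(out, _swapped(state, k, k + 1))
--     for k in range(len(state) - n):
--         if (state[k] == 0) != (state[k + n] == 0):
--             _insert_sorted(out, _swapped(state, k, k + n))
--     return out
-- ===== Notes on version B (the rewrite author's own statement) =====
-- stated objective: alternative
-- what changed: B scans the grid's adjacency edges once (horizontal pairs (k,k+1) within a row, vertical pairs (k,k+n)), fires a move whenever exactly one endpoint is empty, rebuilds the board by a symmetric-swap comprehension, and maintains the output in sorted order by incremental insertion instead of collecting per-empty-cell direction branches and sorting at the end.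
-- intended difference: On states whose length is not a perfect square and where some cell k just outside the n*n grid's last row is empty with a nonzero cell n below it, A asymmetrically omits the move of that lower tile up into the empty cell (its i<n-1 guard blocks it) while still allowing tiles to move down into such out-of-grid cells; B treats every vertical neighbour pair symmetrically and also returns that successor, the consistent reading of a board that is not n*n to begin with. — e.g. on get_succ([1, 2, 3, 4, 5, 6, 0, 8, 9, 10]): A returns [[1, 2, 3, 0, 5, 6, 4, 8, 9, 10], [1, 2, 3, 4, 5, 6, 8, 0, 9, 10]], B returns [[1, 2, 3, 0, 5, 6, 4, 8, 9, 10], [1, 2, 3, 4, 5, 6, 8, 0, 9, 10], [1, 2, 3, 4, 5, 6, 10, 8, 9, 0]]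
import Mathlib
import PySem

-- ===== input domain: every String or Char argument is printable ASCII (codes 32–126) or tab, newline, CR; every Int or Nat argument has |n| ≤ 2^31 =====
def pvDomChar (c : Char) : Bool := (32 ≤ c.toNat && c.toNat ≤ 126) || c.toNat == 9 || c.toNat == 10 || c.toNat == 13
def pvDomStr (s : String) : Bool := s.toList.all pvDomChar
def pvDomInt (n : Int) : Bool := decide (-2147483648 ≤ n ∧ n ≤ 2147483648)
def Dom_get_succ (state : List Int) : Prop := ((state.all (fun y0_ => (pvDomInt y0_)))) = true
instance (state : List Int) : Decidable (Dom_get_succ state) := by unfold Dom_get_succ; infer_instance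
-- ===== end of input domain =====

-- B scans adjacency edges (k,k+1)/(k,k+n) once, firing a symmetric swap whenever exactly one
-- endpoint is empty, and keeps the output sorted by incremental insertion instead of A's
-- per-empty-cell direction branches followed by a final sort (objective: alternative).


-- ===== PORT A =====
-- int(x ** 0.5) on a list length: hand-ported integer square root (exact here; PySem has no float sqrt)
def pvIsqrt : Nat → Nat
  | 0 => 0
  | m + 1 => let r := pvIsqrt m; if (r + 1) * (r + 1) ≤ m + 1 then r + 1 else r

def get_succ (state : List Int) : List (List Int) :=
  let n : Int := (pvIsqrt state.length : Int)
  let empty_indices : List Int :=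
    ((PySem.List.enumerate state).filter (fun p => p.2 == 0)).map (fun p => p.1)
  let succ_states : List (List Int) :=
    empty_indices.foldl (fun succ_states empty_index =>
      let i := PySem.Int.floordiv empty_index n
      let j := PySem.Int.mod empty_index n
      let succ_states :=
        if 0 < i ∧ PySem.List.pyGetD state ((i-1)*n+j) 0 ≠ 0 then
          succ_states ++ [PySem.List.pySetD
            (PySem.List.pySetD state empty_index (PySem.List.pyGetD state ((i-1)*n+j) 0)) ((i-1)*n+j) 0]
        else succ_states
      let succ_states :=
        if i < n-1 ∧ PySem.List.pyGetD state ((i+1)*n+j) 0 ≠ 0 then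
          succ_states ++ [PySem.List.pySetD
            (PySem.List.pySetD state empty_index (PySem.List.pyGetD state ((i+1)*n+j) 0)) ((i+1)*n+j) 0]
        else succ_states
      let succ_states :=
        if 0 < j ∧ PySem.List.pyGetD state (i*n+(j-1)) 0 ≠ 0 then
          succ_states ++ [PySem.List.pySetD
            (PySem.List.pySetD state empty_index (PySem.List.pyGetD state (i*n+(j-1)) 0)) (i*n+(j-1)) 0]
        else succ_states
      let succ_states :=
        if j < n-1 ∧ PySem.List.pyGetD state (i*n+(j+1)) 0 ≠ 0 then
          succ_states ++ [PySem.List.pySetD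
            (PySem.List.pySetD state empty_index (PySem.List.pyGetD state (i*n+(j+1)) 0)) (i*n+(j+1)) 0]
        else succ_states
      succ_states) []
  PySem.List.sorted succ_states (fun x => x) false

-- ===== PORT B =====
-- _swapped(state, a, b): comprehension over enumerate(state)
def pvSwp (state : List Int) (a b : Int) : List Int :=
  (PySem.List.enumerate state).map (fun p =>
    if p.1 == a then PySem.List.pyGetD state b 0
    else if p.1 == b then PySem.List.pyGetD state a 0 else p.2)

-- _insert_sorted(out, s): linear scan past every element not greater than s, insert there
def pvInsert : List (List Int) → List Int → List (List Int)
  | [], s => [s]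
  | y :: t, s => if s < y then s :: y :: t else y :: pvInsert t s

def get_succ_alt (state : List Int) : List (List Int) :=
  let n : Int := (pvIsqrt state.length : Int)
  let out : List (List Int) :=
    (PySem.List.pyRange 0 (PySem.List.len state - 1) 1).foldl (fun out k =>
      if PySem.Int.mod k n != n - 1 &&
          ((PySem.List.pyGetD state k 0 == 0) != (PySem.List.pyGetD state (k+1) 0 == 0)) then
        pvInsert out (pvSwp state k (k+1))
      else out) []
  (PySem.List.pyRange 0 (PySem.List.len state - n) 1).foldl (fun out k =>
    if (PySem.List.pyGetD state k 0 == 0) != (PySem.List.pyGetD state (k+n) 0 == 0) then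
      pvInsert out (pvSwp state k (k+n))
    else out) out

-- ===== PRECONDITION & SPEC =====
-- Pre_ excludes exactly the inputs on which A raises IndexError: a state whose LAST cell is
-- empty while not sitting in the last column of the int(sqrt(len))-wide grid (A then reads
-- state[len] for the move from the right).
def Pre_get_succ (state : List Int) : Prop :=
  state.getLast? = some 0 →
    ∀ n : Nat, n < state.length + 1 → n * n ≤ state.length →
      state.length < (n + 1) * (n + 1) → (state.length - 1) % n = n - 1
instance (state : List Int) : Decidable (Pre_get_succ state) := by unfold Pre_get_succ; infer_instance
def pvWitness_get_succ : List Int := [1, 2, 3, 4, 5, 6, 7, 8, 0]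

-- On non-square-length states with an empty cell k whose vertical partner k+n lies at or beyond
-- the n*n grid (k+n < len ≤ any, n*n ≤ k+n) and holds a tile, A's i<n-1 guard asymmetrically
-- omits that tile's move up into the empty cell while still allowing moves down into such
-- out-of-grid cells; B treats every vertical pair symmetrically and returns that successor too,
-- the consistent reading of a board that is not n*n to begin with.
def D_get_succ (state : List Int) : Prop :=
  ∃ k ∈ List.range state.length,
    k + pvIsqrt state.length < state.length ∧
    pvIsqrt state.length * pvIsqrt state.length ≤ k + pvIsqrt state.length ∧
    state.getD k 1 = 0 ∧ state.getD (k + pvIsqrt state.length) 0 ≠ 0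
instance (state : List Int) : Decidable (D_get_succ state) := by unfold D_get_succ; infer_instance

def Spec_get_succ (state : List Int) (out : List (List Int)) : Prop :=
  ¬ D_get_succ state → out = get_succ_alt state
instance (state : List Int) (out : List (List Int)) : Decidable (Spec_get_succ state out) := by unfold Spec_get_succ; infer_instance

def pvDiffWitness_get_succ : List Int := [1, 2, 3, 4, 5, 6, 0, 8, 9, 10]
def pvDiffWitnessOut_get_succ : (List (List Int)) × (List (List Int)) :=
  ([[1, 2, 3, 0, 5, 6, 4, 8, 9, 10], [1, 2, 3, 4, 5, 6, 8, 0, 9, 10]],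
   [[1, 2, 3, 0, 5, 6, 4, 8, 9, 10], [1, 2, 3, 4, 5, 6, 8, 0, 9, 10], [1, 2, 3, 4, 5, 6, 10, 8, 9, 0]])

-- ===== CLAIM (what is proved, stated in full; the proofs are below) =====
def Claim_unchanged_get_succ : Prop := ∀ (state : List Int), Dom_get_succ state → Pre_get_succ state → Spec_get_succ state (get_succ state)
def Claim_changed_get_succ : Prop := Dom_get_succ (pvDiffWitness_get_succ) ∧ Pre_get_succ (pvDiffWitness_get_succ) ∧ D_get_succ (pvDiffWitness_get_succ) ∧ get_succ (pvDiffWitness_get_succ) = pvDiffWitnessOut_get_succ.1 ∧ get_succ_alt (pvDiffWitness_get_succ) = pvDiffWitnessOut_get_succ.2 ∧ pvDiffWitnessOut_get_succ.1 ≠ pvDiffWitnessOut_get_succ.2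
def Claim_exact_get_succ : Prop := ∀ (state : List Int), Dom_get_succ state → Pre_get_succ state → D_get_succ state → get_succ state ≠ get_succ_alt state

-- ===== LEMMAS AND PROOFS =====

theorem pvIsqrt_eq (m : Nat) : pvIsqrt m = Nat.sqrt m := by
  induction m with
  | zero => simp [pvIsqrt]
  | succ m ih =>
    have h1 : Nat.sqrt m * Nat.sqrt m ≤ m := Nat.sqrt_le m
    have h2 : m < (Nat.sqrt m + 1) * (Nat.sqrt m + 1) := Nat.lt_succ_sqrt m
    simp only [pvIsqrt, ih]
    split_ifs with h
    · have ha : Nat.sqrt m + 1 ≤ Nat.sqrt (m + 1) := Nat.le_sqrt.mpr h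
      have hb : Nat.sqrt (m + 1) < Nat.sqrt m + 2 := Nat.sqrt_lt.mpr (by nlinarith)
      omega
    · have ha : Nat.sqrt m ≤ Nat.sqrt (m + 1) := Nat.le_sqrt.mpr (by omega)
      have hb : Nat.sqrt (m + 1) < Nat.sqrt m + 1 := Nat.sqrt_lt.mpr (by omega)
      omega

-- ==== appended lemma draft (to be inserted before VERDICT) ====

-- The four successor blocks A appends for one empty cell k (board width n).
def gU (st : List Int) (n k : Int) : List (List Int) :=
  if 0 < PySem.Int.floordiv k n ∧
      PySem.List.pyGetD st ((PySem.Int.floordiv k n - 1)*n + PySem.Int.mod k n) 0 ≠ 0 then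
    [PySem.List.pySetD (PySem.List.pySetD st k
      (PySem.List.pyGetD st ((PySem.Int.floordiv k n - 1)*n + PySem.Int.mod k n) 0))
      ((PySem.Int.floordiv k n - 1)*n + PySem.Int.mod k n) 0]
  else []
def gD (st : List Int) (n k : Int) : List (List Int) :=
  if PySem.Int.floordiv k n < n - 1 ∧
      PySem.List.pyGetD st ((PySem.Int.floordiv k n + 1)*n + PySem.Int.mod k n) 0 ≠ 0 then
    [PySem.List.pySetD (PySem.List.pySetD st k
      (PySem.List.pyGetD st ((PySem.Int.floordiv k n + 1)*n + PySem.Int.mod k n) 0))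
      ((PySem.Int.floordiv k n + 1)*n + PySem.Int.mod k n) 0]
  else []
def gL (st : List Int) (n k : Int) : List (List Int) :=
  if 0 < PySem.Int.mod k n ∧
      PySem.List.pyGetD st (PySem.Int.floordiv k n * n + (PySem.Int.mod k n - 1)) 0 ≠ 0 then
    [PySem.List.pySetD (PySem.List.pySetD st k
      (PySem.List.pyGetD st (PySem.Int.floordiv k n * n + (PySem.Int.mod k n - 1)) 0))
      (PySem.Int.floordiv k n * n + (PySem.Int.mod k n - 1)) 0]
  else []
def gR (st : List Int) (n k : Int) : List (List Int) :=
  if PySem.Int.mod k n < n - 1 ∧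
      PySem.List.pyGetD st (PySem.Int.floordiv k n * n + (PySem.Int.mod k n + 1)) 0 ≠ 0 then
    [PySem.List.pySetD (PySem.List.pySetD st k
      (PySem.List.pyGetD st (PySem.Int.floordiv k n * n + (PySem.Int.mod k n + 1)) 0))
      (PySem.Int.floordiv k n * n + (PySem.Int.mod k n + 1)) 0]
  else []

theorem stepA_eq (st : List Int) (n : Int) (acc : List (List Int)) (k : Int) :
    (let i := PySem.Int.floordiv k n
     let j := PySem.Int.mod k n
     let s1 :=
       if 0 < i ∧ PySem.List.pyGetD st ((i-1)*n+j) 0 ≠ 0 then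
         acc ++ [PySem.List.pySetD (PySem.List.pySetD st k (PySem.List.pyGetD st ((i-1)*n+j) 0)) ((i-1)*n+j) 0]
       else acc
     let s2 :=
       if i < n-1 ∧ PySem.List.pyGetD st ((i+1)*n+j) 0 ≠ 0 then
         s1 ++ [PySem.List.pySetD (PySem.List.pySetD st k (PySem.List.pyGetD st ((i+1)*n+j) 0)) ((i+1)*n+j) 0]
       else s1
     let s3 :=
       if 0 < j ∧ PySem.List.pyGetD st (i*n+(j-1)) 0 ≠ 0 then
         s2 ++ [PySem.List.pySetD (PySem.List.pySetD st k (PySem.List.pyGetD st (i*n+(j-1)) 0)) (i*n+(j-1)) 0]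
       else s2
     let s4 :=
       if j < n-1 ∧ PySem.List.pyGetD st (i*n+(j+1)) 0 ≠ 0 then
         s3 ++ [PySem.List.pySetD (PySem.List.pySetD st k (PySem.List.pyGetD st (i*n+(j+1)) 0)) (i*n+(j+1)) 0]
       else s3
     s4) = acc ++ (gU st n k ++ gD st n k ++ gL st n k ++ gR st n k) := by
  simp only [gU, gD, gL, gR]
  split_ifs <;> simp

theorem getA_eq (st : List Int) :
    get_succ st =
      PySem.List.sorted
        (((PySem.List.enumerate st).filter (fun p => p.2 == 0)).flatMap
          (fun p => gU st (pvIsqrt st.length : Int) p.1 ++ gD st (pvIsqrt st.length : Int) p.1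
            ++ gL st (pvIsqrt st.length : Int) p.1 ++ gR st (pvIsqrt st.length : Int) p.1))
        (fun x => x) false := by
  unfold get_succ
  simp only [List.foldl_map, stepA_eq]
  rw [PySem.List.foldl_append_eq_flatMap, List.nil_append]

theorem flatMap_map_comp {α β γ : Type} (l : List α) (f : α → β) (g : β → List γ) :
    (l.map f).flatMap g = l.flatMap (fun x => g (f x)) := by
  induction l with
  | nil => rfl
  | cons x t ih => simp [ih]

theorem flatMap_ite_singleton {α β : Type} (l : List α) (P : α → Prop) [DecidablePred P] (f : α → β) :
    (l.flatMap fun e => if P e then [f e] else []) = (l.filter (fun e => decide (P e))).map f := by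
  induction l with
  | nil => rfl
  | cons x t ih => by_cases h : P x <;> simp [h, ih]

theorem flatMap_four_perm {α β : Type} (l : List α) (f1 f2 f3 f4 : α → List β) :
    (l.flatMap fun x => f1 x ++ f2 x ++ f3 x ++ f4 x).Perm
      (l.flatMap f1 ++ l.flatMap f2 ++ l.flatMap f3 ++ l.flatMap f4) := by
  rw [← Multiset.coe_eq_coe]
  induction l with
  | nil => simp
  | cons x t ih =>
    simp only [List.flatMap_cons, ← Multiset.coe_add] at *
    rw [ih]
    abel

def pvEmpties (st : List Int) : List Int :=
  (PySem.List.pyRange 0 (PySem.List.len st) 1).filter (fun e => PySem.List.pyGetD st e 0 == 0)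

-- basic facts about n = isqrt(len)
theorem n_pos_of_len (st : List Int) (h : 1 ≤ st.length) :
    0 < ((pvIsqrt st.length : Nat) : Int) := by
  rw [pvIsqrt_eq]
  exact_mod_cast Nat.sqrt_pos.mpr h

theorem nsq_le (st : List Int) :
    ((pvIsqrt st.length : Nat) : Int) * ((pvIsqrt st.length : Nat) : Int) ≤ (st.length : Int) := by
  rw [pvIsqrt_eq]
  exact_mod_cast Nat.sqrt_le st.length

theorem n_le_len (st : List Int) :
    ((pvIsqrt st.length : Nat) : Int) ≤ (st.length : Int) := by
  rw [pvIsqrt_eq]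
  exact_mod_cast Nat.sqrt_le_self st.length

-- symmetric swap: characterization
theorem pvSwp_comm (st : List Int) (a b : Int) : pvSwp st a b = pvSwp st b a := by
  unfold pvSwp
  apply List.map_congr_left
  intro p hp
  by_cases h1 : p.1 == a <;> by_cases h2 : p.1 == b <;>
    simp_all
theorem pvSwp_eq (st : List Int) (a b : Int) (ha0 : 0 ≤ a) (haL : a < (st.length : Int))
    (hb0 : 0 ≤ b) (hbL : b < (st.length : Int)) (hab : a ≠ b) :
    pvSwp st a b =
      PySem.List.pySetD (PySem.List.pySetD st a (PySem.List.pyGetD st b 0)) b (PySem.List.pyGetD st a 0) := by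
  unfold pvSwp
  rw [PySem.List.pySetD_of_nonneg (h := ha0), PySem.List.pySetD_of_nonneg (h := hb0)]
  apply List.ext_getElem
  · simp
  · intro k hk1 hk2
    have hkL : k < st.length := by simpa using hk1
    simp only [List.getElem_map, PySem.List.getElem_enumerate, List.getElem_set, zero_add]
    by_cases hka : (k : Int) = a
    · have h1 : a.toNat = k := by omega
      have h2 : ¬ b.toNat = k := by omega
      simp [hka, h1, h2]
    · by_cases hkb : (k : Int) = b
      · have h1 : b.toNat = k := by omega
        have h3 : ¬ (k : Int) = a := by omega
        simp only [hkb, h1]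
        simp
        exact fun h => absurd h.symm hab
      · have h1 : ¬ a.toNat = k := by omega
        have h2 : ¬ b.toNat = k := by omega
        simp [hka, hkb, h1, h2]
-- ==== part 2: B shape ====

theorem pvInsert_eq (acc : List (List Int)) (s : List Int) :
    pvInsert acc s = PySem.List.insertBy (fun a b => decide (a < b)) s acc := by
  induction acc with
  | nil => simp [pvInsert, PySem.List.insertBy]
  | cons y t ih => simp [pvInsert, PySem.List.insertBy, ih]

theorem foldl_pvInsert_sorted (l : List (List Int)) :
    l.foldl pvInsert [] = PySem.List.sorted l (fun x => x) false := by
  rw [PySem.List.sorted_eq_foldl_insertBy]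
  apply PySem.List.foldl_congr_mem
  intro acc x _
  exact pvInsert_eq acc x

-- edge predicates and lists of B
def cH (st : List Int) (k : Int) : Bool :=
  PySem.Int.mod k ((pvIsqrt st.length : Nat) : Int) != ((pvIsqrt st.length : Nat) : Int) - 1 &&
    ((PySem.List.pyGetD st k 0 == 0) != (PySem.List.pyGetD st (k+1) 0 == 0))
def cV (st : List Int) (k : Int) : Bool :=
  (PySem.List.pyGetD st k 0 == 0) != (PySem.List.pyGetD st (k + ((pvIsqrt st.length : Nat) : Int)) 0 == 0)

def Hlist (st : List Int) : List (List Int) :=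
  ((PySem.List.pyRange 0 ((st.length : Int) - 1) 1).filter (cH st)).map (fun k => pvSwp st k (k+1))
def Vlist (st : List Int) : List (List Int) :=
  ((PySem.List.pyRange 0 ((st.length : Int) - ((pvIsqrt st.length : Nat) : Int)) 1).filter (cV st)).map
    (fun k => pvSwp st k (k + ((pvIsqrt st.length : Nat) : Int)))

theorem getB_eq (st : List Int) :
    get_succ_alt st = PySem.List.sorted (Hlist st ++ Vlist st) (fun x => x) false := by
  simp only [get_succ_alt, Hlist, Vlist, PySem.List.len_eq]
  rw [PySem.List.foldl_if_eq_foldl_filter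
    (p := fun k => PySem.Int.mod k ((pvIsqrt st.length : Nat) : Int) != ((pvIsqrt st.length : Nat) : Int) - 1 &&
      ((PySem.List.pyGetD st k 0 == 0) != (PySem.List.pyGetD st (k+1) 0 == 0)))
    (f := fun out k => pvInsert out (pvSwp st k (k+1)))]
  rw [PySem.List.foldl_if_eq_foldl_filter
    (p := fun k => (PySem.List.pyGetD st k 0 == 0) != (PySem.List.pyGetD st (k + ((pvIsqrt st.length : Nat) : Int)) 0 == 0))
    (f := fun out k => pvInsert out (pvSwp st k (k + ((pvIsqrt st.length : Nat) : Int))))]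
  rw [← List.foldl_map (f := fun k => pvSwp st k (k+1)) (g := pvInsert)]
  rw [← List.foldl_map (f := fun k => pvSwp st k (k + ((pvIsqrt st.length : Nat) : Int))) (g := pvInsert)]
  rw [← List.foldl_append, foldl_pvInsert_sorted]
  rfl
-- ==== part 3: perm machinery ====

-- direction-split edge predicates
def hRp (st : List Int) (k : Int) : Bool :=
  PySem.Int.mod k ((pvIsqrt st.length : Nat) : Int) != ((pvIsqrt st.length : Nat) : Int) - 1 &&
    !(PySem.List.pyGetD st k 0 == 0) && (PySem.List.pyGetD st (k+1) 0 == 0)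
def hLp (st : List Int) (k : Int) : Bool :=
  PySem.Int.mod k ((pvIsqrt st.length : Nat) : Int) != ((pvIsqrt st.length : Nat) : Int) - 1 &&
    (PySem.List.pyGetD st k 0 == 0) && !(PySem.List.pyGetD st (k+1) 0 == 0)
def vBp (st : List Int) (k : Int) : Bool :=
  !(PySem.List.pyGetD st k 0 == 0) && (PySem.List.pyGetD st (k + ((pvIsqrt st.length : Nat) : Int)) 0 == 0)
def vTp (st : List Int) (k : Int) : Bool :=
  (PySem.List.pyGetD st k 0 == 0) && !(PySem.List.pyGetD st (k + ((pvIsqrt st.length : Nat) : Int)) 0 == 0)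

theorem cH_split (st : List Int) (k : Int) : cH st k = (hRp st k || hLp st k) := by
  unfold cH hRp hLp
  cases PySem.Int.mod k ((pvIsqrt st.length : Nat) : Int) != ((pvIsqrt st.length : Nat) : Int) - 1 <;>
    cases PySem.List.pyGetD st k 0 == 0 <;> cases PySem.List.pyGetD st (k+1) 0 == 0 <;> rfl

theorem cV_split (st : List Int) (k : Int) : cV st k = (vBp st k || vTp st k) := by
  unfold cV vBp vTp
  cases PySem.List.pyGetD st k 0 == 0 <;>
    cases PySem.List.pyGetD st (k + ((pvIsqrt st.length : Nat) : Int)) 0 == 0 <;> rfl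

theorem filter_or_perm {α : Type} (l : List α) (p q : α → Bool)
    (h : ∀ x ∈ l, ¬(p x = true ∧ q x = true)) :
    (l.filter (fun x => p x || q x)).Perm (l.filter p ++ l.filter q) := by
  induction l with
  | nil => simp
  | cons x t ih =>
    have ht := ih (fun y hy => h y (List.mem_cons_of_mem x hy))
    by_cases hp : p x = true
    · have hq : q x = false := by
        have := h x (List.mem_cons_self)
        cases hqx : q x
        · rfl
        · exact absurd ⟨hp, hqx⟩ this
      simp [hp, hq]
      exact ht
    · have hp' : p x = false := by simpa using hp
      by_cases hq : q x = true
      · simp only [List.filter_cons, hp', hq, Bool.false_or, cond_true, cond_false]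
        exact (ht.cons x).trans (List.perm_middle.symm)
      · have hq' : q x = false := by simpa using hq
        simp [hp', hq']
        exact ht
  -- strict filter-length with a one-sided witness

theorem filter_length_lt {α : Type} (p q : α → Bool) :
    ∀ l : List α, (∀ x ∈ l, p x = true → q x = true) → ∀ x0 ∈ l, q x0 = true → p x0 = false →
      (l.filter p).length < (l.filter q).length := by
  intro l
  induction l with
  | nil => intro _ x0 h; cases h
  | cons x t ih =>
    intro himp x0 hx0 hq0 hp0
    have himpt : ∀ y ∈ t, p y = true → q y = true := fun y hy => himp y (List.mem_cons_of_mem x hy)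
    have hle : (t.filter p).length ≤ (t.filter q).length := by
      simpa [← List.countP_eq_length_filter] using List.countP_mono_left (l := t) himpt
    rcases List.mem_cons.mp hx0 with rfl | hx0t
    · simp only [List.filter_cons, hp0, hq0, cond_true, cond_false]
      simp
      omega
    · have hlt := ih himpt x0 hx0t hq0 hp0
      by_cases hpx : p x = true
      · have hqx := himp x List.mem_cons_self hpx
        simp only [List.filter_cons, hpx, hqx, cond_true]
        simpa using hlt
      · have hpx' : p x = false := by simpa using hpx
        cases hqx : q x <;> simp only [List.filter_cons, hpx', hqx, cond_true, cond_false] <;> simp <;> omega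

-- shift a zero-based range
theorem pyRange_shift (a m : Int) :
    (PySem.List.pyRange 0 m 1).map (fun k => k + a) = PySem.List.pyRange a (m + a) 1 := by
  rw [PySem.List.pyRange_one, PySem.List.pyRange_one]
  rw [List.map_map]
  have : (m + a - a).toNat = (m - 0).toNat := by omega
  rw [this]
  apply List.map_congr_left
  intro k _
  simp
  omega

-- mod facts
theorem mod_succ_pos_iff (k n : Int) (hn : 0 < n) :
    0 < PySem.Int.mod (k+1) n ↔ PySem.Int.mod k n ≠ n - 1 := by
  rw [PySem.Int.mod_eq_emod_of_pos hn, PySem.Int.mod_eq_emod_of_pos hn]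
  have h1 : 0 ≤ k % n := Int.emod_nonneg k (by omega)
  have h2 : k % n < n := Int.emod_lt_of_pos k hn
  by_cases hn1 : n = 1
  · subst hn1; simp [Int.emod_one]
  · have hone : (1:Int) % n = 1 := Int.emod_eq_of_lt (by omega) (by omega)
    have key : (k+1) % n = (k % n + 1) % n := by
      rw [Int.add_emod, hone]
    by_cases hr : k % n = n - 1
    · rw [key, hr]
      have : (n - 1 + 1) % n = 0 := by
        have : n - 1 + 1 = n := by ring
        rw [this, Int.emod_self]
      omega
    · have : (k % n + 1) % n = k % n + 1 := Int.emod_eq_of_lt (by omega) (by omega)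
      rw [key, this]
      omega
-- ==== part 4: the four direction conversions ====

theorem pre_last (st : List Int) (hpre : Pre_get_succ st) (hl : 1 ≤ st.length)
    (hz : PySem.List.pyGetD st ((st.length : Int) - 1) 0 = 0) :
    PySem.Int.mod ((st.length : Int) - 1) ((pvIsqrt st.length : Nat) : Int) =
      ((pvIsqrt st.length : Nat) : Int) - 1 := by
  have hval' : st[((st.length : Int) - 1).toNat] = 0 := by
    rw [PySem.List.pyGetD_eq_getElem st 0 (by omega) (by omega)] at hz
    exact hz
  have hget : st.getLast? = some 0 := by
    rw [List.getLast?_eq_getElem?]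
    have he' : ((st.length : Int) - 1).toNat = st.length - 1 := by omega
    rw [List.getElem?_eq_getElem (by omega)]
    congr 1
    simp only [he'] at hval'
    exact hval'
  have hs1 : pvIsqrt st.length * pvIsqrt st.length ≤ st.length := by
    rw [pvIsqrt_eq]; exact Nat.sqrt_le st.length
  have hs2 : st.length < (pvIsqrt st.length + 1) * (pvIsqrt st.length + 1) := by
    rw [pvIsqrt_eq]; exact Nat.lt_succ_sqrt st.length
  have hs0 : pvIsqrt st.length < st.length + 1 := by
    rw [pvIsqrt_eq]; have := Nat.sqrt_le_self st.length; omega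
  have hmodnat := hpre hget (pvIsqrt st.length) hs0 hs1 hs2
  have hn1 : 1 ≤ pvIsqrt st.length := by
    rw [pvIsqrt_eq]; exact Nat.sqrt_pos.mpr hl
  have hlen1 : ((st.length : Int) - 1) = ((st.length - 1 : Nat) : Int) := by omega
  rw [hlen1, PySem.Int.mod_natCast, hmodnat]
  omega

theorem fmL_eq (st : List Int) :
    (pvEmpties st).flatMap (fun e => gL st ((pvIsqrt st.length : Nat) : Int) e) =
      ((PySem.List.pyRange 0 ((st.length : Int) - 1) 1).filter (hRp st)).map
        (fun k => pvSwp st k (k+1)) := by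
  by_cases h0 : st.length = 0
  · have hst : st = [] := List.length_eq_zero_iff.mp h0
    subst hst
    simp only [pvEmpties, PySem.List.len_eq, List.length_nil, Nat.cast_zero]
    rw [PySem.List.pyRange_one_eq_nil (by norm_num), PySem.List.pyRange_one_eq_nil (by norm_num)]
    rfl
  have hl : 1 ≤ st.length := by omega
  have hn0 : 0 < ((pvIsqrt st.length : Nat) : Int) := n_pos_of_len st hl
  have hidx : ∀ e : Int, PySem.Int.floordiv e ((pvIsqrt st.length : Nat) : Int) * ((pvIsqrt st.length : Nat) : Int) + (PySem.Int.mod e ((pvIsqrt st.length : Nat) : Int) - 1) = e - 1 := by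
    intro e
    have h := PySem.Int.floordiv_mul_add_mod e ((pvIsqrt st.length : Nat) : Int)
    omega
  simp only [gL, hidx]
  rw [flatMap_ite_singleton]
  unfold pvEmpties
  rw [PySem.List.len_eq, List.filter_filter]
  rw [PySem.List.pyRange_one_append 0 1 (st.length : Int) (by omega) (by exact_mod_cast hl)]
  have h01 : PySem.List.pyRange 0 1 1 = [0] := by
    decide
  rw [h01, List.filter_append]
  have hz0 : PySem.Int.mod 0 ((pvIsqrt st.length : Nat) : Int) = 0 := by
    rw [PySem.Int.mod_eq_emod_of_pos hn0]; simp
  have hf0 : List.filter (fun e => decide (0 < PySem.Int.mod e ((pvIsqrt st.length : Nat) : Int) ∧ PySem.List.pyGetD st (e - 1) 0 ≠ 0) && (PySem.List.pyGetD st e 0 == 0)) [0] = [] := by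
    simp [hz0]
  rw [hf0, List.nil_append]
  have hshift : PySem.List.pyRange 1 (st.length : Int) 1 =
      (PySem.List.pyRange 0 ((st.length : Int) - 1) 1).map (fun k => k + 1) := by
    rw [pyRange_shift]
    congr 1
    ring
  rw [hshift, List.filter_map, List.map_map]
  rw [List.filter_congr (fun k hk => ?_)]
  · apply List.map_congr_left
    intro k hk
    rw [List.mem_filter] at hk
    obtain ⟨hmem, hcond⟩ := hk
    rw [PySem.List.mem_pyRange_one] at hmem
    unfold hRp at hcond
    simp only [Bool.and_eq_true, bne_iff_ne, ne_eq, Bool.not_eq_true', beq_eq_false_iff_ne,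
      beq_iff_eq] at hcond
    obtain ⟨⟨hg, hnz⟩, hz1⟩ := hcond
    simp only [Function.comp]
    have harith : k + 1 - 1 = k := by ring
    rw [harith]
    rw [pvSwp_comm, pvSwp_eq st (k+1) k (by omega) (by omega) (by omega) (by omega) (by omega)]
    rw [hz1]
  · rw [PySem.List.mem_pyRange_one] at hk
    simp only [Function.comp]
    have harith : k + 1 - 1 = k := by ring
    rw [harith]
    rw [Bool.eq_iff_iff]
    unfold hRp
    simp only [Bool.and_eq_true, decide_eq_true_eq, bne_iff_ne, ne_eq, Bool.not_eq_true',
      beq_eq_false_iff_ne, beq_iff_eq]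
    rw [mod_succ_pos_iff k _ hn0]
-- ==== part 5 ====

theorem fmR_eq (st : List Int) (hpre : Pre_get_succ st) :
    (pvEmpties st).flatMap (fun e => gR st ((pvIsqrt st.length : Nat) : Int) e) =
      ((PySem.List.pyRange 0 ((st.length : Int) - 1) 1).filter (hLp st)).map
        (fun k => pvSwp st k (k+1)) := by
  by_cases h0 : st.length = 0
  · have hst : st = [] := List.length_eq_zero_iff.mp h0
    subst hst
    simp only [pvEmpties, PySem.List.len_eq, List.length_nil, Nat.cast_zero]
    rw [PySem.List.pyRange_one_eq_nil (by norm_num), PySem.List.pyRange_one_eq_nil (by norm_num)]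
    rfl
  have hl : 1 ≤ st.length := by omega
  have hn0 : 0 < ((pvIsqrt st.length : Nat) : Int) := n_pos_of_len st hl
  have hidx : ∀ e : Int, PySem.Int.floordiv e ((pvIsqrt st.length : Nat) : Int) * ((pvIsqrt st.length : Nat) : Int) + (PySem.Int.mod e ((pvIsqrt st.length : Nat) : Int) + 1) = e + 1 := by
    intro e
    have h := PySem.Int.floordiv_mul_add_mod e ((pvIsqrt st.length : Nat) : Int)
    omega
  simp only [gR, hidx]
  rw [flatMap_ite_singleton]
  unfold pvEmpties
  rw [PySem.List.len_eq, List.filter_filter]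
  have hsplit : PySem.List.pyRange 0 (st.length : Int) 1 =
      PySem.List.pyRange 0 ((st.length : Int) - 1) 1 ++ [(st.length : Int) - 1] := by
    have h := PySem.List.pyRange_one_succ_right (a := 0) (b := (st.length : Int) - 1) (by omega)
    simpa [show (st.length : Int) - 1 + 1 = (st.length : Int) from by ring] using h
  rw [hsplit, List.filter_append]
  have hlast : List.filter (fun e => decide (PySem.Int.mod e ((pvIsqrt st.length : Nat) : Int) < ((pvIsqrt st.length : Nat) : Int) - 1 ∧ PySem.List.pyGetD st (e + 1) 0 ≠ 0) && (PySem.List.pyGetD st e 0 == 0)) [(st.length : Int) - 1] = [] := by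
    simp only [List.filter_cons, List.filter_nil]
    by_cases hz : PySem.List.pyGetD st ((st.length : Int) - 1) 0 = 0
    · have hm := pre_last st hpre hl hz
      simp [hm]
    · simp [hz]
  rw [hlast, List.append_nil]
  rw [List.filter_congr (fun k hk => ?_)]
  · apply List.map_congr_left
    intro k hk
    rw [List.mem_filter] at hk
    obtain ⟨hmem, hcond⟩ := hk
    rw [PySem.List.mem_pyRange_one] at hmem
    unfold hLp at hcond
    simp only [Bool.and_eq_true, bne_iff_ne, ne_eq, Bool.not_eq_true', beq_eq_false_iff_ne,
      beq_iff_eq] at hcond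
    obtain ⟨⟨hg, hz⟩, hnz⟩ := hcond
    rw [pvSwp_eq st k (k+1) (by omega) (by omega) (by omega) (by omega) (by omega)]
    rw [hz]
  · rw [PySem.List.mem_pyRange_one] at hk
    rw [Bool.eq_iff_iff]
    unfold hLp
    simp only [Bool.and_eq_true, decide_eq_true_eq, bne_iff_ne, ne_eq, Bool.not_eq_true',
      beq_eq_false_iff_ne, beq_iff_eq]
    have h1 := PySem.Int.mod_nonneg k hn0
    have h2 := PySem.Int.mod_lt k hn0
    have hiff : PySem.Int.mod k ((pvIsqrt st.length : Nat) : Int) < ((pvIsqrt st.length : Nat) : Int) - 1 ↔ ¬ PySem.Int.mod k ((pvIsqrt st.length : Nat) : Int) = ((pvIsqrt st.length : Nat) : Int) - 1 := by omega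
    rw [hiff]
    tauto

theorem fmU_eq (st : List Int) :
    (pvEmpties st).flatMap (fun e => gU st ((pvIsqrt st.length : Nat) : Int) e) =
      ((PySem.List.pyRange 0 ((st.length : Int) - ((pvIsqrt st.length : Nat) : Int)) 1).filter (vBp st)).map
        (fun k => pvSwp st k (k + ((pvIsqrt st.length : Nat) : Int))) := by
  by_cases h0 : st.length = 0
  · have hst : st = [] := List.length_eq_zero_iff.mp h0
    subst hst
    simp only [pvEmpties, PySem.List.len_eq, List.length_nil, Nat.cast_zero]
    rw [PySem.List.pyRange_one_eq_nil (by norm_num), PySem.List.pyRange_one_eq_nil (by simp [pvIsqrt])]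
    rfl
  have hl : 1 ≤ st.length := by omega
  have hn0 : 0 < ((pvIsqrt st.length : Nat) : Int) := n_pos_of_len st hl
  have hnL : ((pvIsqrt st.length : Nat) : Int) ≤ (st.length : Int) := n_le_len st
  have hidx : ∀ e : Int, (PySem.Int.floordiv e ((pvIsqrt st.length : Nat) : Int) - 1) * ((pvIsqrt st.length : Nat) : Int) + PySem.Int.mod e ((pvIsqrt st.length : Nat) : Int) = e - ((pvIsqrt st.length : Nat) : Int) := by
    intro e
    have h := PySem.Int.floordiv_mul_add_mod e ((pvIsqrt st.length : Nat) : Int)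
    have h2 : (PySem.Int.floordiv e ((pvIsqrt st.length : Nat) : Int) - 1) * ((pvIsqrt st.length : Nat) : Int) = PySem.Int.floordiv e ((pvIsqrt st.length : Nat) : Int) * ((pvIsqrt st.length : Nat) : Int) - ((pvIsqrt st.length : Nat) : Int) := by ring
    omega
  simp only [gU, hidx]
  rw [flatMap_ite_singleton]
  unfold pvEmpties
  rw [PySem.List.len_eq, List.filter_filter]
  rw [PySem.List.pyRange_one_append 0 ((pvIsqrt st.length : Nat) : Int) (st.length : Int) (by omega) hnL]
  rw [List.filter_append]
  have hfirst : List.filter (fun e => decide (0 < PySem.Int.floordiv e ((pvIsqrt st.length : Nat) : Int) ∧ PySem.List.pyGetD st (e - ((pvIsqrt st.length : Nat) : Int)) 0 ≠ 0) && (PySem.List.pyGetD st e 0 == 0)) (PySem.List.pyRange 0 ((pvIsqrt st.length : Nat) : Int) 1) = [] := by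
    rw [List.filter_eq_nil_iff]
    intro e he
    rw [PySem.List.mem_pyRange_one] at he
    have hfd : PySem.Int.floordiv e ((pvIsqrt st.length : Nat) : Int) = 0 := by
      rw [PySem.Int.floordiv_eq_iff_of_pos hn0]
      constructor
      · simpa using he.1
      · simpa using he.2
    simp [hfd]
  rw [hfirst, List.nil_append]
  have hshift : PySem.List.pyRange ((pvIsqrt st.length : Nat) : Int) (st.length : Int) 1 =
      (PySem.List.pyRange 0 ((st.length : Int) - ((pvIsqrt st.length : Nat) : Int)) 1).map
        (fun k => k + ((pvIsqrt st.length : Nat) : Int)) := by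
    rw [pyRange_shift]
    congr 1
    ring
  rw [hshift, List.filter_map, List.map_map]
  rw [List.filter_congr (fun k hk => ?_)]
  · apply List.map_congr_left
    intro k hk
    rw [List.mem_filter] at hk
    obtain ⟨hmem, hcond⟩ := hk
    rw [PySem.List.mem_pyRange_one] at hmem
    unfold vBp at hcond
    simp only [Bool.and_eq_true, Bool.not_eq_true', beq_eq_false_iff_ne, ne_eq, beq_iff_eq] at hcond
    obtain ⟨hnz, hz⟩ := hcond
    simp only [Function.comp]
    have harith : k + ((pvIsqrt st.length : Nat) : Int) - ((pvIsqrt st.length : Nat) : Int) = k := by ring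
    rw [harith]
    rw [pvSwp_comm, pvSwp_eq st (k + ((pvIsqrt st.length : Nat) : Int)) k (by omega) (by omega) (by omega) (by omega) (by omega)]
    rw [hz]
  · rw [PySem.List.mem_pyRange_one] at hk
    simp only [Function.comp]
    have harith : k + ((pvIsqrt st.length : Nat) : Int) - ((pvIsqrt st.length : Nat) : Int) = k := by ring
    rw [harith]
    rw [Bool.eq_iff_iff]
    unfold vBp
    simp only [Bool.and_eq_true, decide_eq_true_eq, Bool.not_eq_true', beq_eq_false_iff_ne,
      ne_eq, beq_iff_eq]
    have hguard : 0 < PySem.Int.floordiv (k + ((pvIsqrt st.length : Nat) : Int)) ((pvIsqrt st.length : Nat) : Int) := by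
      have h := (PySem.Int.le_floordiv_iff_mul_le (a := k + ((pvIsqrt st.length : Nat) : Int)) (q := 1) hn0).mpr (by omega)
      omega
    tauto

theorem fmD_shape (st : List Int) :
    (pvEmpties st).flatMap (fun e => gD st ((pvIsqrt st.length : Nat) : Int) e) =
      ((PySem.List.pyRange 0 ((st.length : Int) - ((pvIsqrt st.length : Nat) : Int)) 1).filter
        (fun k => decide (k + ((pvIsqrt st.length : Nat) : Int) < ((pvIsqrt st.length : Nat) : Int) * ((pvIsqrt st.length : Nat) : Int)) && vTp st k)).map
        (fun k => pvSwp st k (k + ((pvIsqrt st.length : Nat) : Int))) := by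
  by_cases h0 : st.length = 0
  · have hst : st = [] := List.length_eq_zero_iff.mp h0
    subst hst
    simp only [pvEmpties, PySem.List.len_eq, List.length_nil, Nat.cast_zero]
    rw [PySem.List.pyRange_one_eq_nil (by norm_num), PySem.List.pyRange_one_eq_nil (by simp [pvIsqrt])]
    rfl
  have hl : 1 ≤ st.length := by omega
  have hn0 : 0 < ((pvIsqrt st.length : Nat) : Int) := n_pos_of_len st hl
  have hnL : ((pvIsqrt st.length : Nat) : Int) ≤ (st.length : Int) := n_le_len st
  have hsq : ((pvIsqrt st.length : Nat) : Int) * ((pvIsqrt st.length : Nat) : Int) ≤ (st.length : Int) := nsq_le st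
  have hexp : (((pvIsqrt st.length : Nat) : Int) - 1) * ((pvIsqrt st.length : Nat) : Int) = ((pvIsqrt st.length : Nat) : Int) * ((pvIsqrt st.length : Nat) : Int) - ((pvIsqrt st.length : Nat) : Int) := by ring
  have hidx : ∀ e : Int, (PySem.Int.floordiv e ((pvIsqrt st.length : Nat) : Int) + 1) * ((pvIsqrt st.length : Nat) : Int) + PySem.Int.mod e ((pvIsqrt st.length : Nat) : Int) = e + ((pvIsqrt st.length : Nat) : Int) := by
    intro e
    have h := PySem.Int.floordiv_mul_add_mod e ((pvIsqrt st.length : Nat) : Int)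
    have h2 : (PySem.Int.floordiv e ((pvIsqrt st.length : Nat) : Int) + 1) * ((pvIsqrt st.length : Nat) : Int) = PySem.Int.floordiv e ((pvIsqrt st.length : Nat) : Int) * ((pvIsqrt st.length : Nat) : Int) + ((pvIsqrt st.length : Nat) : Int) := by ring
    omega
  have hguard : ∀ e : Int, PySem.Int.floordiv e ((pvIsqrt st.length : Nat) : Int) < ((pvIsqrt st.length : Nat) : Int) - 1 ↔ e + ((pvIsqrt st.length : Nat) : Int) < ((pvIsqrt st.length : Nat) : Int) * ((pvIsqrt st.length : Nat) : Int) := by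
    intro e
    rw [PySem.Int.floordiv_lt_iff_lt_mul hn0]
    omega
  simp only [gD, hidx]
  rw [flatMap_ite_singleton]
  unfold pvEmpties
  rw [PySem.List.len_eq, List.filter_filter]
  rw [PySem.List.pyRange_one_append 0 ((st.length : Int) - ((pvIsqrt st.length : Nat) : Int)) (st.length : Int) (by omega) (by omega)]
  rw [List.filter_append]
  have hsecond : List.filter (fun e => decide (PySem.Int.floordiv e ((pvIsqrt st.length : Nat) : Int) < ((pvIsqrt st.length : Nat) : Int) - 1 ∧ PySem.List.pyGetD st (e + ((pvIsqrt st.length : Nat) : Int)) 0 ≠ 0) && (PySem.List.pyGetD st e 0 == 0)) (PySem.List.pyRange ((st.length : Int) - ((pvIsqrt st.length : Nat) : Int)) (st.length : Int) 1) = [] := by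
    rw [List.filter_eq_nil_iff]
    intro e he
    rw [PySem.List.mem_pyRange_one] at he
    have : ¬ PySem.Int.floordiv e ((pvIsqrt st.length : Nat) : Int) < ((pvIsqrt st.length : Nat) : Int) - 1 := by
      rw [hguard e]
      omega
    simp [this]
  rw [hsecond, List.append_nil]
  rw [List.filter_congr (fun k hk => ?_)]
  · apply List.map_congr_left
    intro k hk
    rw [List.mem_filter] at hk
    obtain ⟨hmem, hcond⟩ := hk
    rw [PySem.List.mem_pyRange_one] at hmem
    unfold vTp at hcond
    simp only [Bool.and_eq_true, decide_eq_true_eq, Bool.not_eq_true', beq_eq_false_iff_ne,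
      ne_eq, beq_iff_eq] at hcond
    obtain ⟨hlt, hz, hnz⟩ := hcond
    rw [pvSwp_eq st k (k + ((pvIsqrt st.length : Nat) : Int)) (by omega) (by omega) (by omega) (by omega) (by omega)]
    rw [hz]
  · rw [PySem.List.mem_pyRange_one] at hk
    rw [Bool.eq_iff_iff]
    unfold vTp
    simp only [Bool.and_eq_true, decide_eq_true_eq, Bool.not_eq_true', beq_eq_false_iff_ne,
      ne_eq, beq_iff_eq]
    rw [hguard k]
    tauto
-- ==== part 6: assembly ====

theorem hRp_hLp_disjoint (st : List Int) : ∀ k : Int, ¬(hRp st k = true ∧ hLp st k = true) := by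
  intro k ⟨h1, h2⟩
  unfold hRp at h1
  unfold hLp at h2
  simp only [Bool.and_eq_true, Bool.not_eq_true', beq_eq_false_iff_ne, ne_eq, beq_iff_eq] at h1 h2
  exact h1.1.2 h2.1.2

theorem vBp_vTp_disjoint (st : List Int) : ∀ k : Int, ¬(vBp st k = true ∧ vTp st k = true) := by
  intro k ⟨h1, h2⟩
  unfold vBp at h1
  unfold vTp at h2
  simp only [Bool.and_eq_true, Bool.not_eq_true', beq_eq_false_iff_ne, ne_eq, beq_iff_eq] at h1 h2
  exact h1.1 h2.1

theorem Hlist_perm (st : List Int) :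
    (Hlist st).Perm
      (((PySem.List.pyRange 0 ((st.length : Int) - 1) 1).filter (hRp st)).map (fun k => pvSwp st k (k+1)) ++
       ((PySem.List.pyRange 0 ((st.length : Int) - 1) 1).filter (hLp st)).map (fun k => pvSwp st k (k+1))) := by
  unfold Hlist
  rw [List.filter_congr (fun k _ => cH_split st k)]
  rw [← List.map_append]
  exact (filter_or_perm _ _ _ (fun k _ => hRp_hLp_disjoint st k)).map _

theorem Vlist_perm (st : List Int) :
    (Vlist st).Perm
      (((PySem.List.pyRange 0 ((st.length : Int) - ((pvIsqrt st.length : Nat) : Int)) 1).filter (vBp st)).map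
          (fun k => pvSwp st k (k + ((pvIsqrt st.length : Nat) : Int))) ++
       ((PySem.List.pyRange 0 ((st.length : Int) - ((pvIsqrt st.length : Nat) : Int)) 1).filter (vTp st)).map
          (fun k => pvSwp st k (k + ((pvIsqrt st.length : Nat) : Int)))) := by
  unfold Vlist
  rw [List.filter_congr (fun k _ => cV_split st k)]
  rw [← List.map_append]
  exact (filter_or_perm _ _ _ (fun k _ => vBp_vTp_disjoint st k)).map _

-- the D-dependent pointwise fact: k+n < n*n on fired top-empty edges, from ¬D
theorem vTp_guard_of_notD (st : List Int) (hD : ¬ D_get_succ st) (k : Int)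
    (hk : 0 ≤ k ∧ k < (st.length : Int) - ((pvIsqrt st.length : Nat) : Int))
    (hv : vTp st k = true) :
    k + ((pvIsqrt st.length : Nat) : Int) < ((pvIsqrt st.length : Nat) : Int) * ((pvIsqrt st.length : Nat) : Int) := by
  have hnL : ((pvIsqrt st.length : Nat) : Int) ≤ (st.length : Int) := n_le_len st
  unfold vTp at hv
  simp only [Bool.and_eq_true, Bool.not_eq_true', beq_eq_false_iff_ne, ne_eq, beq_iff_eq] at hv
  obtain ⟨hz, hnz⟩ := hv
  by_contra hge
  apply hD
  refine ⟨k.toNat, List.mem_range.mpr (by omega), by omega, by omega, ?_, ?_⟩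
  · rw [List.getD_eq_getElem st 1 (by omega)]
    rw [PySem.List.pyGetD_eq_getElem st 0 (by omega) (by omega)] at hz
    exact hz
  · rw [List.getD_eq_getElem st 0 (by omega)]
    rw [PySem.List.pyGetD_eq_getElem st 0 (by omega) (by omega)] at hnz
    have hidx : (k + ((pvIsqrt st.length : Nat) : Int)).toNat = k.toNat + pvIsqrt st.length := by omega
    simp only [hidx] at hnz
    exact hnz

theorem fmD_eq (st : List Int) (hD : ¬ D_get_succ st) :
    (pvEmpties st).flatMap (fun e => gD st ((pvIsqrt st.length : Nat) : Int) e) =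
      ((PySem.List.pyRange 0 ((st.length : Int) - ((pvIsqrt st.length : Nat) : Int)) 1).filter (vTp st)).map
        (fun k => pvSwp st k (k + ((pvIsqrt st.length : Nat) : Int))) := by
  rw [fmD_shape]
  congr 1
  apply List.filter_congr
  intro k hk
  rw [PySem.List.mem_pyRange_one] at hk
  cases hv : vTp st k
  · simp
  · simp only [Bool.and_true]
    simp only [decide_eq_true_eq]
    exact vTp_guard_of_notD st hD k hk hv

theorem main_perm (st : List Int) (hpre : Pre_get_succ st) (hD : ¬ D_get_succ st) :
    (((PySem.List.enumerate st).filter (fun p => p.2 == 0)).flatMap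
      (fun p => gU st (pvIsqrt st.length : Int) p.1 ++ gD st (pvIsqrt st.length : Int) p.1
        ++ gL st (pvIsqrt st.length : Int) p.1 ++ gR st (pvIsqrt st.length : Int) p.1)).Perm
      (Hlist st ++ Vlist st) := by
  have hbase : ((PySem.List.enumerate st).filter (fun p => p.2 == 0)).flatMap
      (fun p => gU st (pvIsqrt st.length : Int) p.1 ++ gD st (pvIsqrt st.length : Int) p.1
        ++ gL st (pvIsqrt st.length : Int) p.1 ++ gR st (pvIsqrt st.length : Int) p.1) =
      (pvEmpties st).flatMap (fun e => gU st (pvIsqrt st.length : Int) e ++ gD st (pvIsqrt st.length : Int) e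
        ++ gL st (pvIsqrt st.length : Int) e ++ gR st (pvIsqrt st.length : Int) e) := by
    rw [PySem.List.enumerate_eq_map_pyRange st 0, List.filter_map, flatMap_map_comp]
    rfl
  rw [hbase]
  refine (flatMap_four_perm _ _ _ _ _).trans ?_
  rw [fmU_eq st, fmD_eq st hD, fmL_eq st, fmR_eq st hpre]
  have h2 := (Hlist_perm st).append (Vlist_perm st)
  refine List.Perm.trans ?_ h2.symm
  rw [← Multiset.coe_eq_coe]
  simp only [← Multiset.coe_add]
  abel
theorem base_eq (st : List Int) :
    ((PySem.List.enumerate st).filter (fun p => p.2 == 0)).flatMap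
      (fun p => gU st (pvIsqrt st.length : Int) p.1 ++ gD st (pvIsqrt st.length : Int) p.1
        ++ gL st (pvIsqrt st.length : Int) p.1 ++ gR st (pvIsqrt st.length : Int) p.1) =
      (pvEmpties st).flatMap (fun e => gU st (pvIsqrt st.length : Int) e ++ gD st (pvIsqrt st.length : Int) e
        ++ gL st (pvIsqrt st.length : Int) e ++ gR st (pvIsqrt st.length : Int) e) := by
  rw [PySem.List.enumerate_eq_map_pyRange st 0, List.filter_map, flatMap_map_comp]
  rfl

theorem sorted_perm_congr (l1 l2 : List (List Int)) (h : l1.Perm l2) :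
    PySem.List.sorted l1 (fun x => x) false = PySem.List.sorted l2 (fun x => x) false := by
  have h2 := (PySem.List.sorted_id_eq_sorted_id_iff_perm l1 l2).mpr h
  convert h2 using 2

-- ===== VERDICT (by name: the statement is the Claim_ definition above) =====
theorem get_succ_spec : Claim_unchanged_get_succ := by
  intro st _dom hpre
  unfold Spec_get_succ
  intro hD
  rw [getA_eq, getB_eq]
  exact sorted_perm_congr _ _ (main_perm st hpre hD)

theorem get_succ_changed : Claim_changed_get_succ := by unfold Claim_changed_get_succ; decide

theorem get_succ_tight : Claim_exact_get_succ := by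
  intro st _dom hpre hD heq
  obtain ⟨k', hk'mem, h1, h2, h3, h4⟩ := hD
  have hk'lt := List.mem_range.mp hk'mem
  have hcast : ((k' : Int) + ((pvIsqrt st.length : Nat) : Int)).toNat = k' + pvIsqrt st.length := by
    omega
  have hq : vTp st (k' : Int) = true := by
    unfold vTp
    simp only [Bool.and_eq_true, Bool.not_eq_true', beq_eq_false_iff_ne, ne_eq, beq_iff_eq]
    constructor
    · rw [PySem.List.pyGetD_eq_getElem st 0 (by omega) (by exact_mod_cast hk'lt)]
      rw [List.getD_eq_getElem st 1 hk'lt] at h3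
      simpa using h3
    · rw [PySem.List.pyGetD_eq_getElem st 0 (by omega) (by omega)]
      rw [List.getD_eq_getElem st 0 (by omega)] at h4
      simpa [hcast] using h4
  have hp : (decide ((k' : Int) + ((pvIsqrt st.length : Nat) : Int) < ((pvIsqrt st.length : Nat) : Int) * ((pvIsqrt st.length : Nat) : Int)) && vTp st (k' : Int)) = false := by
    have hnot : ¬ ((k' : Int) + ((pvIsqrt st.length : Nat) : Int) < ((pvIsqrt st.length : Nat) : Int) * ((pvIsqrt st.length : Nat) : Int)) := by
      omega
    simp [hnot]
  have hx0 : (k' : Int) ∈ PySem.List.pyRange 0 ((st.length : Int) - ((pvIsqrt st.length : Nat) : Int)) 1 := by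
    rw [PySem.List.mem_pyRange_one]
    constructor
    · omega
    · omega
  have hlt := filter_length_lt
    (fun k => decide (k + ((pvIsqrt st.length : Nat) : Int) < ((pvIsqrt st.length : Nat) : Int) * ((pvIsqrt st.length : Nat) : Int)) && vTp st k)
    (vTp st)
    (PySem.List.pyRange 0 ((st.length : Int) - ((pvIsqrt st.length : Nat) : Int)) 1)
    (by intro x _ hx
        simp only [Bool.and_eq_true] at hx
        exact hx.2)
    (k' : Int) hx0 hq hp
  rw [getA_eq, getB_eq] at heq
  have hlen := congrArg List.length heq
  rw [PySem.List.length_sorted, PySem.List.length_sorted] at hlen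
  rw [base_eq st] at hlen
  rw [(flatMap_four_perm (pvEmpties st) _ _ _ _).length_eq] at hlen
  rw [fmU_eq st, fmL_eq st, fmR_eq st hpre, fmD_shape st] at hlen
  simp only [List.length_append] at hlen
  rw [(Hlist_perm st).length_eq, (Vlist_perm st).length_eq] at hlen
  simp only [List.length_append, List.length_map] at hlen
  omega
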